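-- pv_equiv track=rewrite | github.com/sone92cn/PyPackage | ExcelTool.py | isCordnateAddress
-- ===== SOURCE A (Python) =====
-- def isCordnateAddress(cord):
--     cord = cord.upper()
--     for i, c in enumerate(cord):
--         if ord(c) < ord('A') or ord(c) > ord('Z'):
--             break
--     else:
--         return False
--
--     if 0 < i < len(cord):
--         for c in cord[i:]:
--             if ord(c) < ord('0') or ord(c) > ord('9'):
--                 return False
--         return True
--     else:
--         return False
-- ===== SOURCE B (Python) =====
-- def isCordnateAddress(cord):
--     s = cord.upper()
--     head = s.rstrip('0123456789')
--     return 0 < len(head) < len(s) and all('A' <= c <= 'Z' for c in head)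
-- ===== Notes on version B (the rewrite author's own statement) =====
-- stated objective: simpler
-- what changed: B replaces A's index-tracking enumerate loop with break/else plus a second digit-checking loop by stripping the trailing digit run with rstrip and checking the remaining prefix is nonempty, shorter than the string, and all ASCII uppercase letters.
import Mathlib
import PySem

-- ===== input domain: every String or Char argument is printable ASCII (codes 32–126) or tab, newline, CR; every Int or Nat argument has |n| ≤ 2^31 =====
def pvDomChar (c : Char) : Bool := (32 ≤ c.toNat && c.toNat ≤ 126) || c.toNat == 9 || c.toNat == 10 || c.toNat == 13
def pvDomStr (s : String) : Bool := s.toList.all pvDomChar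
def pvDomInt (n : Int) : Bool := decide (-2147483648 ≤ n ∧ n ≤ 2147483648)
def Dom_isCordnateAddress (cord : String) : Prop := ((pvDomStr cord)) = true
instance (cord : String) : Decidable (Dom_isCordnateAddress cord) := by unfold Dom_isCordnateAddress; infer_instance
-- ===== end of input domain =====

-- B validates by stripping the trailing digit run (rstrip-style) and checking the remaining
-- prefix is nonempty, shorter than the string, and all A-Z; simpler than A's two indexed loops.


-- ===== PORT A =====
-- the enumerate loop with break/else: returns the break index, none = no break (all letters)
def pvLoopA : List Char → Nat → Option Nat
  | [], _ => none
  | c :: rest, i => if c.toNat < 65 ∨ c.toNat > 90 then some i else pvLoopA rest (i + 1)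

-- the second loop over cord[i:]: early `return False` on a non-digit, else True
def pvAllDigitsA : List Char → Bool
  | [] => true
  | c :: rest => if c.toNat < 48 ∨ c.toNat > 57 then false else pvAllDigitsA rest

def isCordnateAddress (cord : String) : Bool :=
  let l := (PySem.Str.upper cord).toList
  match pvLoopA l 0 with
  | none => false
  | some i => if 0 < i ∧ i < l.length then pvAllDigitsA (l.drop i) else false  -- cord[i:] with 0 ≤ i = drop i

-- ===== PORT B =====
def pvIsUp (c : Char) : Bool := decide (65 ≤ c.toNat ∧ c.toNat ≤ 90)   -- 'A' <= c <= 'Z'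
def pvIsDig (c : Char) : Bool := decide (48 ≤ c.toNat ∧ c.toNat ≤ 57)  -- c in '0123456789'

-- s.rstrip('0123456789') ported by hand as reverse/dropWhile/reverse (exact for this char set)
def isCordnateAddress_alt (cord : String) : Bool :=
  let l := (PySem.Str.upper cord).toList
  let head := (l.reverse.dropWhile pvIsDig).reverse
  decide (0 < head.length ∧ head.length < l.length) && head.all pvIsUp

-- ===== PRECONDITION & SPEC =====
def Spec_isCordnateAddress (cord : String) (out : Bool) : Prop := out = isCordnateAddress_alt cord
instance (cord : String) (out : Bool) : Decidable (Spec_isCordnateAddress cord out) := by unfold Spec_isCordnateAddress; infer_instance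

-- ===== CLAIM (what is proved, stated in full; the proofs are below) =====
def Claim_equal_isCordnateAddress : Prop := ∀ (cord : String), Dom_isCordnateAddress cord → Spec_isCordnateAddress cord (isCordnateAddress cord)

-- ===== LEMMAS AND PROOFS =====

-- common characterisation: nonempty letter prefix, then a nonempty all-digit rest
def pvPS (l : List Char) : Prop :=
  l.takeWhile pvIsUp ≠ [] ∧ l.dropWhile pvIsUp ≠ [] ∧ (l.dropWhile pvIsUp).all pvIsDig = true

lemma pvUp_not_dig {c : Char} (h : pvIsUp c = true) : pvIsDig c = false := by
  simp [pvIsUp] at h; simp [pvIsDig]; omega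

lemma pvDig_not_up {c : Char} (h : pvIsDig c = true) : pvIsUp c = false := by
  simp [pvIsDig] at h; simp [pvIsUp]; omega

lemma pvLoopA_eq (l : List Char) : ∀ i, pvLoopA l i =
    if l.dropWhile pvIsUp = [] then none else some (i + (l.takeWhile pvIsUp).length) := by
  induction l with
  | nil => intro i; simp [pvLoopA]
  | cons c t ih =>
    intro i
    by_cases h : c.toNat < 65 ∨ c.toNat > 90
    · have hc : pvIsUp c = false := by simp [pvIsUp]; omega
      simp [pvLoopA, h, hc]
    · have hc : pvIsUp c = true := by simp [pvIsUp]; omega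
      simp [pvLoopA, h, hc, ih]
      split_ifs
      · rfl
      · simp; omega

lemma pvAllDigitsA_eq (l : List Char) : pvAllDigitsA l = l.all pvIsDig := by
  induction l with
  | nil => simp [pvAllDigitsA]
  | cons c t ih =>
    by_cases h : c.toNat < 48 ∨ c.toNat > 57
    · have hc : pvIsDig c = false := by simp [pvIsDig]; omega
      simp [pvAllDigitsA, h, hc]
    · have hc : pvIsDig c = true := by simp [pvIsDig]; omega
      simp [pvAllDigitsA, h, hc, ih]

lemma pvDropWhile_append_all {p : Char → Bool} {xs : List Char} (ys : List Char)
    (hx : ∀ x ∈ xs, p x = true) : (xs ++ ys).dropWhile p = ys.dropWhile p := by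
  induction xs with
  | nil => simp
  | cons a t ih => simp_all

lemma pvSpan_append {p : Char → Bool} {xs : List Char} {c : Char} (ys : List Char)
    (hx : ∀ x ∈ xs, p x = true) (hc : p c = false) :
    (xs ++ c :: ys).takeWhile p = xs ∧ (xs ++ c :: ys).dropWhile p = c :: ys := by
  induction xs with
  | nil => simp [hc]
  | cons a t ih => simp_all

lemma pvA_iff (l : List Char) :
    (match pvLoopA l 0 with
     | none => false
     | some i => if 0 < i ∧ i < l.length then pvAllDigitsA (l.drop i) else false) = true ↔ pvPS l := by
  rw [pvLoopA_eq l 0]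
  by_cases hdw : l.dropWhile pvIsUp = []
  · simp [hdw, pvPS]
  · have hlen : (l.takeWhile pvIsUp).length + (l.dropWhile pvIsUp).length = l.length := by
      rw [← List.length_append, List.takeWhile_append_dropWhile]
    have hdrop : l.drop (l.takeWhile pvIsUp).length = l.dropWhile pvIsUp := by
      nth_rewrite 2 [← List.takeWhile_append_dropWhile (p := pvIsUp) (l := l)]
      exact List.drop_left
    have hlt : (l.takeWhile pvIsUp).length < l.length := by
      have : (l.dropWhile pvIsUp).length ≠ 0 := by simpa using hdw
      omega
    simp only [hdw, if_false, Nat.zero_add, hdrop, pvAllDigitsA_eq, pvPS]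
    constructor
    · intro h
      split_ifs at h with hc
      · exact ⟨List.ne_nil_of_length_pos hc.1, hdw, h⟩
    · rintro ⟨h1, -, h3⟩
      have : 0 < (l.takeWhile pvIsUp).length := List.length_pos_of_ne_nil h1
      simp [this, hlt, h3]

lemma pvB_iff (l : List Char) :
    ((decide (0 < ((l.reverse.dropWhile pvIsDig).reverse).length ∧
        ((l.reverse.dropWhile pvIsDig).reverse).length < l.length)) &&
      ((l.reverse.dropWhile pvIsDig).reverse).all pvIsUp) = true ↔ pvPS l := by
  constructor
  · rintro h
    simp only [Bool.and_eq_true, decide_eq_true_eq] at h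
    obtain ⟨⟨hpos, hlt⟩, hall⟩ := h
    set T := l.reverse.takeWhile pvIsDig with hT
    set D := l.reverse.dropWhile pvIsDig with hD
    have hl : l = D.reverse ++ T.reverse := by
      have : l.reverse = T ++ D := (List.takeWhile_append_dropWhile).symm
      calc l = l.reverse.reverse := by simp
        _ = (T ++ D).reverse := by rw [← this]
        _ = D.reverse ++ T.reverse := by simp
    have hTd : ∀ x ∈ T.reverse, pvIsDig x = true := by
      intro x hx
      exact List.mem_takeWhile_imp (by simpa using hx)
    have hTne : T.reverse ≠ [] := by
      intro hnil
      have : l.length = D.reverse.length := by rw [hl, hnil]; simp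
      omega
    obtain ⟨c, rest, hcr⟩ := List.exists_cons_of_ne_nil hTne
    have hcd : pvIsDig c = true := hTd c (by simp [hcr])
    have hspan := pvSpan_append (p := pvIsUp) (xs := D.reverse) (c := c) rest
      (by intro x hx; exact List.all_eq_true.mp hall x hx) (pvDig_not_up hcd)
    rw [hcr] at hl
    refine ⟨?_, ?_, ?_⟩
    · rw [hl, hspan.1]; exact List.ne_nil_of_length_pos hpos
    · rw [hl, hspan.2]; simp
    · rw [hl, hspan.2, ← hcr]
      exact List.all_eq_true.mpr hTd
  · rintro ⟨h1, h2, h3⟩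
    set tw := l.takeWhile pvIsUp with htw
    set dw := l.dropWhile pvIsUp with hdw
    have hl : l = tw ++ dw := (List.takeWhile_append_dropWhile).symm
    obtain ⟨c, rest, hcr⟩ := List.exists_cons_of_ne_nil h1
    have hcu : pvIsUp c = true := by
      have : c ∈ tw := by simp [hcr]
      exact List.mem_takeWhile_imp this
    have hdwd : ∀ x ∈ dw.reverse, pvIsDig x = true := by
      intro x hx
      exact List.all_eq_true.mp h3 x (by simpa using hx)
    have hrev : l.reverse = dw.reverse ++ (rest.reverse ++ [c]) := by
      rw [hl, hcr]; simp
    have hdropD : l.reverse.dropWhile pvIsDig = tw.reverse := by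
      rw [hrev, pvDropWhile_append_all _ hdwd]
      have : tw.reverse = rest.reverse ++ [c] := by rw [hcr]; simp
      rw [← this]
      obtain ⟨d, ds, hds⟩ := List.exists_cons_of_ne_nil
        (show tw.reverse ≠ [] by simp [hcr])
      have hdu : pvIsUp d = true := by
        have : d ∈ tw := by
          have : d ∈ tw.reverse := by simp [hds]
          simpa using this
        exact List.mem_takeWhile_imp this
      rw [hds, List.dropWhile_cons, pvUp_not_dig hdu]
      simp
    have hlen : tw.length < l.length := by
      have : l.length = tw.length + dw.length := by rw [hl]; simp
      have : dw.length ≠ 0 := by simpa using h2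
      omega
    simp only [hdropD, List.reverse_reverse, Bool.and_eq_true, decide_eq_true_eq]
    refine ⟨⟨by rw [hcr]; simp, hlen⟩, ?_⟩
    exact List.all_eq_true.mpr (fun x hx => List.mem_takeWhile_imp hx)

-- ===== VERDICT (by name: the statement is the Claim_ definition above) =====
theorem isCordnateAddress_spec : Claim_equal_isCordnateAddress := by
  intro cord _
  unfold Spec_isCordnateAddress isCordnateAddress isCordnateAddress_alt
  rw [Bool.eq_iff_iff]
  exact (pvA_iff _).trans (pvB_iff _).symm
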